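-- pv_equiv track=rewrite | github.com/Juli03b/coding | python-ds-practice/fs_3_three_odd_numbers/three_odd_numbers.py | three_odd_numbers
-- ===== SOURCE A (Python) =====
-- def three_odd_numbers(nums):
--     """Is the sum of any 3 sequential numbers odd?"
--
--         >>> three_odd_numbers([1, 2, 3, 4, 5])
--         True
--
--         >>> three_odd_numbers([0, -2, 4, 1, 9, 12, 4, 1, 0])
--         True
--
--         >>> three_odd_numbers([5, 2, 1])
--         False
--
--         >>> three_odd_numbers([1, 2, 3, 3, 2])
--         False
--     """
--     summed = 0
--     three_count = 0
--     odds = [num for num in nums if not num % 2 == 0]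
--
--     for i in range(len(nums)):
--         arr = nums[i:i + 3]
--         if len(arr) < 3:
--             break
--         summ = sum(arr)
--         if summ % 2:
--             return True
--
--     # for num in odds:
--     #     summed += num
--     #     for n in odds[num - 1::]:
--     #         summed += n
--     #         three_count += 1
--     #         if summed % 2 is not 0 and three_count is 3:
--     #             return True
--     #     three_count = 0
--     #     summed = 0
--     return False
-- ===== SOURCE B (Python) =====
-- def three_odd_numbers(nums):
--     """Is the sum of any 3 sequential numbers odd?"""
--     prefix = [0]
--     for num in nums:
--         prefix.append(prefix[-1] + num)
--     for i in range(len(nums) - 2):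
--         if (prefix[i + 3] - prefix[i]) % 2 == 1:
--             return True
--     return False
-- ===== Notes on version B (the rewrite author's own statement) =====
-- stated objective: alternative
-- what changed: B builds a prefix-sum table in one pass and tests each window's parity as a difference of two prefix sums, instead of re-slicing and re-summing a 3-element window at every index (and A's unused odds filter is gone).
import Mathlib
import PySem

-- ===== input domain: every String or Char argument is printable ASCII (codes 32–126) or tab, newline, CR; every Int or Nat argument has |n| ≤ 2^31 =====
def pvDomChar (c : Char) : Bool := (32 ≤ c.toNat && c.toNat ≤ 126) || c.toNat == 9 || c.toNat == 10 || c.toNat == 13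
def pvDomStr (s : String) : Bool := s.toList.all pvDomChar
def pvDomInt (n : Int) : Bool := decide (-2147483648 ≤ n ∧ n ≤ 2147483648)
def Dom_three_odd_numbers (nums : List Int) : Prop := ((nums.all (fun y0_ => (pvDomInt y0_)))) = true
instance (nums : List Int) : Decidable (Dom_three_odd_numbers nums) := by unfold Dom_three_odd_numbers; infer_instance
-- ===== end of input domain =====

-- B replaces A's per-index slice-and-sum with a pfx-sum table consulted by difference; alternative algorithm, same cost.

-- ===== PORT A =====
-- the 'for i in range(len(nums))' loop; 'break' and 'return True' both end the loop
def three_odd_numbers_loop (nums : List Int) (idxs : List Int) : Bool :=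
  match idxs with
  | [] => false
  | i :: rest =>
    let arr := PySem.List.slice nums (some i) (some (i + 3))
    if arr.length < 3 then false        -- break, then 'return False'
    else
      let summ := arr.sum
      if PySem.Int.mod summ 2 ≠ 0 then true
      else three_odd_numbers_loop nums rest

def three_odd_numbers (nums : List Int) : Bool :=
  -- 'odds' is computed by A but never used afterwards
  let _odds := nums.filter (fun num => !(PySem.Int.mod num 2 == 0))
  three_odd_numbers_loop nums (PySem.List.pyRange 0 nums.length 1)

-- ===== PORT B =====
-- pfx = [0]; for num in nums: pfx.append(pfx[-1] + num)
def three_odd_numbers_alt_prefix (nums : List Int) : List Int :=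
  nums.foldl (fun p num => p ++ [p.getLastD 0 + num]) [0]

-- for i in range(len(nums) - 2): if (pfx[i+3] - pfx[i]) % 2 == 1: return True
def three_odd_numbers_alt_loop (pfx : List Int) (idxs : List Int) : Bool :=
  match idxs with
  | [] => false
  | i :: rest =>
    if PySem.Int.mod ((PySem.List.pyGet? pfx (i + 3)).getD 0
        - (PySem.List.pyGet? pfx i).getD 0) 2 == 1 then true
    else three_odd_numbers_alt_loop pfx rest

def three_odd_numbers_alt (nums : List Int) : Bool :=
  let pfx := three_odd_numbers_alt_prefix nums
  three_odd_numbers_alt_loop pfx (PySem.List.pyRange 0 (nums.length - 2) 1)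

-- ===== PRECONDITION & SPEC =====
def Spec_three_odd_numbers (nums : List Int) (out : Bool) : Prop := out = three_odd_numbers_alt nums
instance (nums : List Int) (out : Bool) : Decidable (Spec_three_odd_numbers nums out) := by unfold Spec_three_odd_numbers; infer_instance

-- ===== CLAIM (what is proved, stated in full; the proofs are below) =====
def Claim_equal_three_odd_numbers : Prop := ∀ (nums : List Int), Dom_three_odd_numbers nums → Spec_three_odd_numbers nums (three_odd_numbers nums)

-- ===== LEMMAS AND PROOFS =====

-- reference sliding window both loops are proved against
def pvW3 : List Int → Bool
  | a :: b :: c :: rest => if (a + b + c) % 2 ≠ 0 then true else pvW3 (b :: c :: rest)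
  | _ => false

theorem pvW3_short (l : List Int) (h : l.length < 3) : pvW3 l = false := by
  match l, h with
  | [], _ => rfl
  | [_], _ => rfl
  | [_, _], _ => rfl

theorem pvA_loop_eq (nums : List Int) (k : Nat) :
    three_odd_numbers_loop nums (PySem.List.pyRange (k : Int) nums.length 1) = pvW3 (nums.drop k) := by
  induction hfuel : nums.length - k generalizing k with
  | zero =>
    have hk : nums.length ≤ k := by omega
    rw [PySem.List.pyRange_one_eq_nil (by exact_mod_cast hk)]
    rw [three_odd_numbers_loop]
    rw [pvW3_short _ (by simp; omega)]
  | succ n ih =>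
    have hk : k < nums.length := by omega
    rw [PySem.List.pyRange_one_cons (by exact_mod_cast hk)]
    rw [three_odd_numbers_loop]
    have hs : PySem.List.slice nums (some (k : Int)) (some ((k : Int) + 3))
        = (nums.drop k).take 3 := by
      have := PySem.List.slice_natCast_add nums k 3
      push_cast at this; exact this
    rw [hs]
    have hIH := ih (k + 1) (by omega)
    rw [show ((k + 1 : Nat) : Int) = (k : Int) + 1 from by push_cast; ring] at hIH
    by_cases hlen : (nums.drop k).length < 3
    · rw [if_pos (by simp [List.length_take, List.length_drop] at *; omega)]
      rw [pvW3_short _ hlen]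
    · push Not at hlen
      rw [if_neg (by simp [List.length_take, List.length_drop] at *; omega)]
      obtain ⟨a, b, c, rest, hd⟩ : ∃ a b c rest, nums.drop k = a :: b :: c :: rest := by
        match hdk : nums.drop k, hlen' : hlen with
        | a :: b :: c :: rest, _ => exact ⟨a, b, c, rest, rfl⟩
      have hd1 : nums.drop (k + 1) = b :: c :: rest := by
        rw [← List.tail_drop, hd]; rfl
      rw [hd1] at hIH
      rw [hd, hIH]
      simp only [List.take, List.sum_cons, List.sum_nil, pvW3]
      simp only [PySem.Int.mod_eq_emod_of_pos (by omega : (0:Int) < 2), add_zero, ← add_assoc]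

theorem pvPrefix_eq (nums : List Int) :
    three_odd_numbers_alt_prefix nums
      = (List.range (nums.length + 1)).map (fun k => (nums.take k).sum) := by
  induction nums using List.reverseRecOn with
  | nil => rfl
  | append_singleton ns x ih =>
    unfold three_odd_numbers_alt_prefix at *
    rw [List.foldl_append, ih]
    simp only [List.foldl_cons, List.foldl_nil]
    have hlast : ((List.range (ns.length + 1)).map (fun k => (ns.take k).sum)).getLastD 0
        = ns.sum := by
      rw [List.range_succ, List.map_append]
      simp
    rw [hlast]
    rw [List.length_append, List.length_singleton]
    rw [show List.range (ns.length + 1 + 1) = List.range (ns.length + 1) ++ [ns.length + 1]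
          from List.range_succ, List.map_append]
    congr 1
    · apply List.map_congr_left
      intro k hk
      rw [List.mem_range] at hk
      rw [List.take_append_of_le_length (by omega)]
    · simp [List.take_append]
      rw [List.take_of_length_le (by omega)]

theorem pvB_loop_eq (nums : List Int) (k : Nat) :
    three_odd_numbers_alt_loop (three_odd_numbers_alt_prefix nums)
        (PySem.List.pyRange (k : Int) ((nums.length : Int) - 2) 1) = pvW3 (nums.drop k) := by
  induction hfuel : nums.length - k generalizing k with
  | zero =>
    rw [PySem.List.pyRange_one_eq_nil (by push_cast; omega)]
    rw [three_odd_numbers_alt_loop]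
    rw [pvW3_short _ (by simp [List.length_drop]; omega)]
  | succ n ih =>
    by_cases hend : nums.length ≤ k + 2
    · rw [PySem.List.pyRange_one_eq_nil (by push_cast; omega)]
      rw [three_odd_numbers_alt_loop]
      rw [pvW3_short _ (by simp [List.length_drop]; omega)]
    · push Not at hend
      have hk3 : k + 3 ≤ nums.length := by omega
      rw [PySem.List.pyRange_one_cons (by push_cast; omega)]
      rw [three_odd_numbers_alt_loop]
      have hp := pvPrefix_eq nums
      have hget : ∀ m : Nat, m ≤ nums.length →
          PySem.List.pyGet? (three_odd_numbers_alt_prefix nums) (m : Int)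
            = some ((nums.take m).sum) := by
        intro m hm
        rw [PySem.List.pyGet?_natCast, hp, List.getElem?_map, List.getElem?_range (by omega)]
        rfl
      have h3 : PySem.List.pyGet? (three_odd_numbers_alt_prefix nums) ((k : Int) + 3)
          = some ((nums.take (k + 3)).sum) := by
        rw [show ((k : Int) + 3) = ((k + 3 : Nat) : Int) from by push_cast; ring]
        exact hget (k + 3) hk3
      rw [h3, hget k (by omega)]
      have hsplit : (nums.take (k + 3)).sum - (nums.take k).sum
          = ((nums.drop k).take 3).sum := by
        rw [List.take_add, List.sum_append]; ring
      obtain ⟨a, b, c, rest, hd⟩ : ∃ a b c rest, nums.drop k = a :: b :: c :: rest := by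
        have hlen : 3 ≤ (nums.drop k).length := by simp [List.length_drop]; omega
        match hdk : nums.drop k, hlen' : hlen with
        | a :: b :: c :: rest, _ => exact ⟨a, b, c, rest, rfl⟩
      have hIH := ih (k + 1) (by omega)
      rw [show ((k + 1 : Nat) : Int) = (k : Int) + 1 from by push_cast; ring] at hIH
      have hd1 : nums.drop (k + 1) = b :: c :: rest := by
        rw [← List.tail_drop, hd]; rfl
      rw [hd1] at hIH
      rw [hIH, hd]
      simp only [Option.getD_some, hsplit, hd]
      simp only [List.take, List.sum_cons, List.sum_nil, pvW3]
      simp only [PySem.Int.mod_eq_emod_of_pos (by omega : (0:Int) < 2), add_zero, ← add_assoc]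
      rcases Int.emod_two_eq (a + b + c) with h2 | h2
      · rw [if_neg (by simp [h2]), if_neg (by omega)]
      · rw [if_pos (by simp [h2]), if_pos (by omega)]

-- ===== VERDICT (by name: the statement is the Claim_ definition above) =====
theorem three_odd_numbers_spec : Claim_equal_three_odd_numbers := by
  intro nums _
  unfold Spec_three_odd_numbers three_odd_numbers three_odd_numbers_alt
  have hA := pvA_loop_eq nums 0
  have hB := pvB_loop_eq nums 0
  simp only [Nat.cast_zero] at hA hB
  simp only [List.drop_zero] at hA hB
  simpa [hA] using hB.symm
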